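-- pv_equiv track=rewrite | github.com/dinyarislam/Python-Code-Samples | HW04.py | highestSum
-- ===== SOURCE A (Python) =====
-- def highestSum(strlist):
--     summation = [0 for k in range(len(strlist))]
--     for i in range(len(strlist)):
--         element = strlist[i]
--         for ch in element:
--             if ch in "1234567890":
--                 summation[i] = summation[i] + int(ch)
--     maxindex = summation.index(max(summation))
--     return maxindex
-- ===== SOURCE B (Python) =====
-- def highestSum(strlist):
--     best_i, best_s = 0, -1
--     for i, s in enumerate(strlist):
--         v = sum(d * s.count(str(d)) for d in range(1, 10))
--         if v > best_s:
--             best_i, best_s = i, v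
--     return best_i
-- ===== Notes on version B (the rewrite author's own statement) =====
-- stated objective: alternative
-- what changed: Digit sums are computed as sum(d * s.count(str(d)) for d in 1..9) (per-digit occurrence counts) instead of a per-character membership scan, and the first-maximal index is tracked in a single running-best loop instead of building a sums list and calling max()/.index().
import Mathlib
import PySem

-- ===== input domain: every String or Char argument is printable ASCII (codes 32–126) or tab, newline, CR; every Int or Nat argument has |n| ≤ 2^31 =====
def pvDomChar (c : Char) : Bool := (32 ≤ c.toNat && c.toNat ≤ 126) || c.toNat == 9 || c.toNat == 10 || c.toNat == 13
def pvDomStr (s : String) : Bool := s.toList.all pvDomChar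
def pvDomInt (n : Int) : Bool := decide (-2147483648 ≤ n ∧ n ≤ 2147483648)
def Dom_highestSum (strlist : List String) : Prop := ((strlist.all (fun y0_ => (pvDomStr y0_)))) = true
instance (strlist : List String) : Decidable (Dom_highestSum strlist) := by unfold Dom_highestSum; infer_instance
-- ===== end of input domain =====

-- B computes each digit sum as sum(d * s.count(str(d)) for d in 1..9) and tracks the
-- running best index in one loop, instead of A's per-character membership scan into a
-- mutable sums list followed by max()/.index(); same value on every non-empty input.

-- ===== PORT A =====
-- 'ch in "1234567890"' is membership of a single character: exact as list membership of ch.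
-- int(ch) for a digit character ch is exactly (ch.toNat : Int) - 48.
def highestSum (strlist : List String) : Int :=
  let summation0 : List Int :=
    (PySem.List.pyRange 0 (strlist.length : Int) 1).map (fun _ => 0)
  let summation : List Int :=
    (PySem.List.pyRange 0 (strlist.length : Int) 1).foldl
      (fun summ i =>
        let element := PySem.List.pyGetD strlist i ""
        element.toList.foldl
          (fun sm ch =>
            if ("1234567890".toList).contains ch then
              PySem.List.pySetD sm i (PySem.List.pyGetD sm i 0 + ((ch.toNat : Int) - 48))
            else sm)
          summ)
      summation0
  match PySem.List.max? summation (fun y => y) with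
  | some m =>
    match PySem.List.index? summation m with
    | some k => (k : Int)
    | none => 0      -- unreachable: max(summation) is a member of summation
  | none => 0        -- Python raises ValueError here (empty list); excluded by Pre_

-- ===== PORT B =====
-- v = sum(d * s.count(str(d)) for d in range(1, 10))
def pvDigitSum (s : String) : Int :=
  (PySem.List.pyRange 1 10 1).foldl
    (fun acc d => acc + d * (PySem.Str.count s (PySem.Int.toStr d) : Int)) 0

-- best_i, best_s = 0, -1; for i, s in enumerate(strlist): if v > best_s: update; return best_i
def highestSum_alt (strlist : List String) : Int :=
  ((PySem.List.enumerate strlist 0).foldl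
    (fun (b : Int × Int) p =>
      let v := pvDigitSum p.2
      if v > b.2 then (p.1, v) else b)
    (0, -1)).1

-- ===== PRECONDITION & SPEC =====
-- Pre_ excludes only the empty list, on which A raises ValueError (max of an empty sequence).
def Pre_highestSum (strlist : List String) : Prop := strlist ≠ []
instance (strlist : List String) : Decidable (Pre_highestSum strlist) := by
  unfold Pre_highestSum; infer_instance

def pvWitness_highestSum : List String := (["a1", "23"])

def Spec_highestSum (strlist : List String) (out : Int) : Prop := out = highestSum_alt strlist
instance (strlist : List String) (out : Int) : Decidable (Spec_highestSum strlist out) := by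
  unfold Spec_highestSum; infer_instance

-- ===== CLAIM (what is proved, stated in full; the proofs are below) =====
def Claim_equal_highestSum : Prop := ∀ (strlist : List String), Dom_highestSum strlist → Pre_highestSum strlist → Spec_highestSum strlist (highestSum strlist)

-- ===== LEMMAS AND PROOFS =====

-- the digit sum as A computes it per string (proof-side helper)
def pvDigitSumA (s : String) : Int :=
  ((s.toList.filter (fun ch => ("1234567890".toList).contains ch)).map
    (fun ch => ((ch.toNat : Int) - 48))).sum

-- ---- A's summation list equals strlist.map pvDigitSumA (carried over) ----

theorem pv_inner_fold (cs : List Char) : ∀ (summ : List Int) (i : Nat), i < summ.length →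
    cs.foldl
      (fun sm ch =>
        if ("1234567890".toList).contains ch then
          sm.set i (sm.getD i 0 + ((ch.toNat : Int) - 48))
        else sm)
      summ
    = summ.set i (summ.getD i 0 +
        ((cs.filter (fun ch => ("1234567890".toList).contains ch)).map
          (fun ch => ((ch.toNat : Int) - 48))).sum) := by
  induction cs with
  | nil =>
    intro summ i h
    simp [List.getD_eq_getElem?_getD, List.getElem?_eq_getElem h]
  | cons c cs ih =>
    intro summ i h
    simp only [List.foldl_cons, List.filter_cons]
    by_cases hc : ("1234567890".toList).contains c
    · simp only [hc, if_pos]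
      rw [ih _ i (by simpa using h)]
      rw [List.set_set]
      congr 1
      have : (summ.set i (summ.getD i 0 + ((c.toNat : Int) - 48))).getD i 0
          = summ.getD i 0 + ((c.toNat : Int) - 48) := by
        simp [List.getD_eq_getElem?_getD, List.getElem?_set_self', List.getElem?_eq_getElem h]
      rw [this]
      rw [List.map_cons, List.sum_cons]; ring
    · simp only [hc, if_neg, Bool.false_eq_true, not_false_iff]
      rw [ih _ i h]

theorem pv_outer (strlist : List String) : ∀ (k : Nat), k ≤ strlist.length →
    (PySem.List.pyRange 0 (k : Int) 1).foldl
      (fun summ i =>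
        (PySem.List.pyGetD strlist i "").toList.foldl
          (fun sm ch =>
            if ("1234567890".toList).contains ch then
              PySem.List.pySetD sm i (PySem.List.pyGetD sm i 0 + ((ch.toNat : Int) - 48))
            else sm)
          summ)
      (List.replicate strlist.length 0)
    = (strlist.take k).map pvDigitSumA ++ List.replicate (strlist.length - k) 0 := by
  intro k
  induction k with
  | zero => intro _; simp
  | succ k ih =>
    intro hk
    have hk' : k ≤ strlist.length := by omega
    have hkr : ((k : Int) + 1) = ((k + 1 : Nat) : Int) := by push_cast; ring
    rw [← hkr, PySem.List.pyRange_one_succ_right (by positivity), List.foldl_append]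
    rw [ih hk']
    simp only [List.foldl_cons, List.foldl_nil]
    have hlen : ((strlist.take k).map pvDigitSumA ++ List.replicate (strlist.length - k) 0).length = strlist.length := by
      simp [List.length_take, Nat.min_eq_left hk']; omega
    have hkn : k < strlist.length := by omega
    simp only [PySem.List.pySetD_natCast, PySem.List.pyGetD_natCast]
    rw [pv_inner_fold _ _ k (by rw [hlen]; exact hkn)]
    have hpl : ((strlist.take k).map pvDigitSumA).length = k := by
      simp [List.length_take, Nat.min_eq_left hk']
    have hrepl : List.replicate (strlist.length - k) (0:Int)
        = 0 :: List.replicate (strlist.length - (k+1)) 0 := by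
      rw [← List.replicate_succ]; congr 1; omega
    have hget : ((strlist.take k).map pvDigitSumA ++ List.replicate (strlist.length - k) 0).getD k 0 = 0 := by
      rw [hrepl, List.getD_eq_getElem?_getD, List.getElem?_append_right (by omega), hpl]
      simp
    rw [hget, hrepl]
    have hset : (((strlist.take k).map pvDigitSumA) ++ 0 :: List.replicate (strlist.length - (k+1)) 0).set k
        (0 + pvDigitSumA (strlist.getD k ""))
        = ((strlist.take k).map pvDigitSumA) ++ (0 + pvDigitSumA (strlist.getD k "")) :: List.replicate (strlist.length - (k+1)) 0 := by
      rw [List.set_append]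
      simp [Nat.min_eq_left hk']
    have hd : (List.map (fun ch => ((ch.toNat:Int) - 48)) (List.filter (fun ch => "1234567890".toList.contains ch) (strlist.getD k "").toList)).sum = pvDigitSumA (strlist.getD k "") := rfl
    rw [hd, hset, List.take_add_one, List.map_append]
    simp [List.getElem?_eq_getElem hkn, List.getD_eq_getElem?_getD]

theorem pv_summation_eq (strlist : List String) :
    (PySem.List.pyRange 0 (strlist.length : Int) 1).foldl
      (fun summ i =>
        (PySem.List.pyGetD strlist i "").toList.foldl
          (fun sm ch =>
            if ("1234567890".toList).contains ch then
              PySem.List.pySetD sm i (PySem.List.pyGetD sm i 0 + ((ch.toNat : Int) - 48))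
            else sm)
          summ)
      ((PySem.List.pyRange 0 (strlist.length : Int) 1).map (fun _ => 0))
    = strlist.map pvDigitSumA := by
  have hz : (PySem.List.pyRange 0 (strlist.length : Int) 1).map (fun _ => (0:Int))
      = List.replicate strlist.length 0 := by
    apply List.eq_replicate_iff.mpr
    constructor
    · simp [PySem.List.length_pyRange_one]
    · intro b hb
      rcases List.mem_map.mp hb with ⟨x, _, hx⟩
      omega
  rw [hz, pv_outer strlist strlist.length le_rfl]
  simp

-- ---- counting a single character: Chars.count cs [c] = cs.count c ----

theorem pv_count_go_single (c : Char) : ∀ (l : List Char) (fuel acc : Nat), l.length ≤ fuel →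
    PySem.Chars.count.go [c] fuel l acc = acc + l.count c := by
  intro l
  induction l with
  | nil =>
    intro fuel acc _
    cases fuel <;> simp [PySem.Chars.count.go]
  | cons h t ih =>
    intro fuel acc hf
    simp only [List.length_cons] at hf
    cases fuel with
    | zero => omega
    | succ f =>
      rw [PySem.Chars.count.go]
      by_cases hc : c = h
      · subst hc
        have hp : [c].isPrefixOf (c :: t) = true := by simp [List.isPrefixOf]
        simp only [hp, if_pos]
        have hdrop : List.drop ([c].length) (c :: t) = t := by simp
        rw [hdrop, ih f (acc + 1) (by omega)]
        simp
        omega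
      · have hb : ([c].isPrefixOf (h :: t)) = false := by
          simp [List.isPrefixOf, hc]
        simp only [hb, Bool.false_eq_true, if_neg, not_false_iff]
        rw [ih f acc (by omega)]
        have : (h == c) = false := by simp [Ne.symm hc]
        simp [List.count_cons, this]

theorem pv_count_single (cs : List Char) (c : Char) :
    PySem.Chars.count cs [c] = cs.count c := by
  unfold PySem.Chars.count
  simp only [List.isEmpty_cons, Bool.false_eq_true, if_neg, not_false_iff]
  simpa using pv_count_go_single c cs cs.length 0 le_rfl

-- ---- B's per-digit-count sum equals A's per-character digit sum ----

theorem pv_digit_sum_counts (cs : List Char) :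
    1 * (cs.count '1' : Int) + 2 * (cs.count '2' : Int) + 3 * (cs.count '3' : Int)
      + 4 * (cs.count '4' : Int) + 5 * (cs.count '5' : Int) + 6 * (cs.count '6' : Int)
      + 7 * (cs.count '7' : Int) + 8 * (cs.count '8' : Int) + 9 * (cs.count '9' : Int)
    = ((cs.filter (fun ch => ("1234567890".toList).contains ch)).map
        (fun ch => ((ch.toNat : Int) - 48))).sum := by
  have hL : "1234567890".toList = ['1','2','3','4','5','6','7','8','9','0'] := by decide
  simp only [hL]
  induction cs with
  | nil => simp
  | cons c t ih =>
    simp only [List.filter_cons]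
    by_cases hm : (['1','2','3','4','5','6','7','8','9','0'] : List Char).contains c
    · rw [if_pos hm]
      have hmem : c ∈ (['1','2','3','4','5','6','7','8','9','0'] : List Char) := by simpa using hm
      simp only [List.mem_cons, List.not_mem_nil, or_false] at hmem
      rcases hmem with rfl|rfl|rfl|rfl|rfl|rfl|rfl|rfl|rfl|rfl <;>
        · simp only [List.map_cons, List.sum_cons, ← ih, List.count_cons]
          norm_num
          try (push_cast; omega)
          try decide
    · have hm' : c ∉ (['1','2','3','4','5','6','7','8','9','0'] : List Char) := by simpa using hm
      simp only [List.mem_cons, List.not_mem_nil, not_or, or_false] at hm'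
      obtain ⟨n1, n2, n3, n4, n5, n6, n7, n8, n9, n0⟩ := hm'
      rw [if_neg (by simpa using hm)]
      simp only [List.count_cons, n1, n2, n3, n4, n5, n6, n7, n8, n9,
        if_false, beq_iff_eq, Nat.add_zero]
      exact ih

theorem pv_pyRange_1_10 : PySem.List.pyRange 1 10 1 = [1,2,3,4,5,6,7,8,9] := by decide

theorem pvDigitSum_eq (s : String) : pvDigitSum s = pvDigitSumA s := by
  unfold pvDigitSum pvDigitSumA
  rw [pv_pyRange_1_10]
  simp only [List.foldl_cons, List.foldl_nil, PySem.Str.count_eq]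
  rw [show PySem.Int.toStr 1 = "1" from by decide, show PySem.Int.toStr 2 = "2" from by decide,
    show PySem.Int.toStr 3 = "3" from by decide, show PySem.Int.toStr 4 = "4" from by decide,
    show PySem.Int.toStr 5 = "5" from by decide, show PySem.Int.toStr 6 = "6" from by decide,
    show PySem.Int.toStr 7 = "7" from by decide, show PySem.Int.toStr 8 = "8" from by decide,
    show PySem.Int.toStr 9 = "9" from by decide]
  rw [show ("1" : String).toList = ['1'] from by decide, show ("2" : String).toList = ['2'] from by decide,
    show ("3" : String).toList = ['3'] from by decide, show ("4" : String).toList = ['4'] from by decide,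
    show ("5" : String).toList = ['5'] from by decide, show ("6" : String).toList = ['6'] from by decide,
    show ("7" : String).toList = ['7'] from by decide, show ("8" : String).toList = ['8'] from by decide,
    show ("9" : String).toList = ['9'] from by decide]
  simp only [pv_count_single]
  rw [← pv_digit_sum_counts s.toList]
  ring

theorem pvDigitSumA_nonneg (s : String) : 0 ≤ pvDigitSumA s := by
  rw [← pvDigitSum_eq]
  unfold pvDigitSum
  rw [pv_pyRange_1_10]
  simp only [List.foldl_cons, List.foldl_nil]
  positivity

-- ---- the "first maximal element" characterisation ----

def pvFirstMax (l : List Int) (k : Nat) (m : Int) : Prop :=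
  k < l.length ∧ l.getD k 0 = m ∧ (∀ j, j < k → l.getD j 0 < m) ∧ (∀ j, j < l.length → l.getD j 0 ≤ m)

theorem pvFirstMax_unique (l : List Int) (k k' : Nat) (m m' : Int)
    (h : pvFirstMax l k m) (h' : pvFirstMax l k' m') : k = k' := by
  obtain ⟨hk, hv, hlt, hle⟩ := h
  obtain ⟨hk', hv', hlt', hle'⟩ := h'
  rcases Nat.lt_trichotomy k k' with hc | hc | hc
  · have h1 := hlt' k hc
    have h2 := hle' k' hk'
    have h3 := hle k' hk'
    omega
  · exact hc
  · have h1 := hlt k' hc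
    have h2 := hle k hk
    have h3 := hle' k hk
    omega

-- ---- B's running-best fold produces the first maximal index ----

theorem pv_foldB (strlist : List String) (h : strlist ≠ []) :
    ∃ (k : Nat) (m : Int), pvFirstMax (strlist.map pvDigitSumA) k m ∧
      (PySem.List.enumerate strlist 0).foldl
        (fun (b : Int × Int) p =>
          let v := pvDigitSum p.2
          if v > b.2 then (p.1, v) else b)
        (0, -1) = ((k : Int), m) := by
  induction strlist using List.reverseRecOn with
  | nil => exact absurd rfl h
  | append_singleton l x ih =>
    rw [PySem.List.enumerate_append, List.foldl_append]
    rcases List.eq_nil_or_concat l with hl | _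
    · subst hl
      refine ⟨0, pvDigitSumA x, ⟨by simp, by simp, by omega, ?_⟩, ?_⟩
      · intro j hj
        simp only [List.length_map, List.nil_append, List.length_cons, List.length_nil] at hj
        have hj0 : j = 0 := by omega
        subst hj0; simp
      · simp only [PySem.List.enumerate, List.foldl_cons, List.foldl_nil]
        have hge := pvDigitSumA_nonneg x
        rw [← pvDigitSum_eq] at hge
        rw [if_pos (by omega)]
        simp [pvDigitSum_eq]
    · have hl : l ≠ [] := by rintro rfl; simp_all
      obtain ⟨k, m, ⟨hk, hv, hlt, hle⟩, hfold⟩ := ih hl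
      rw [hfold]
      simp only [PySem.List.enumerate, List.foldl_cons, List.foldl_nil]
      have hklen : k < l.length := by simpa using hk
      have hgetl : ∀ j : Nat, j < l.length →
          ((l ++ [x]).map pvDigitSumA).getD j 0 = (l.map pvDigitSumA).getD j 0 := by
        intro j hj
        rw [List.map_append, List.getD_eq_getElem?_getD,
          List.getElem?_append_left (by simpa using hj), ← List.getD_eq_getElem?_getD]
      have hgetx : ((l ++ [x]).map pvDigitSumA).getD l.length 0 = pvDigitSumA x := by
        rw [List.map_append, List.getD_eq_getElem?_getD,
          List.getElem?_append_right (by simp), List.length_map]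
        simp
      by_cases hvx : pvDigitSum x > m
      · rw [if_pos hvx]
        refine ⟨l.length, pvDigitSum x, ⟨by simp, ?_, ?_, ?_⟩, by simp⟩
        · rw [hgetx, pvDigitSum_eq]
        · intro j hj
          rw [hgetl j hj]
          exact lt_of_le_of_lt (hle j (by simpa using hj)) hvx
        · intro j hj
          simp only [List.length_map, List.length_append, List.length_singleton] at hj
          rcases Nat.lt_or_ge j l.length with hj' | hj'
          · rw [hgetl j hj']
            exact le_of_lt (lt_of_le_of_lt (hle j (by simpa using hj')) hvx)
          · have : j = l.length := by omega
            subst this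
            rw [hgetx, pvDigitSum_eq]
      · rw [if_neg hvx]
        refine ⟨k, m, ⟨by simp; omega, ?_, ?_, ?_⟩, rfl⟩
        · rw [hgetl k hklen]; exact hv
        · intro j hj
          rw [hgetl j (by omega)]
          exact hlt j hj
        · intro j hj
          simp only [List.length_map, List.length_append, List.length_singleton] at hj
          rcases Nat.lt_or_ge j l.length with hj' | hj'
          · rw [hgetl j hj']
            exact hle j (by simpa using hj')
          · have : j = l.length := by omega
            subst this
            rw [hgetx, ← pvDigitSum_eq]
            omega

-- ---- A's max()/.index() combination produces the first maximal index ----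

theorem pv_A_firstmax (sums : List Int) (m : Int) (k : Nat)
    (hmx : PySem.List.max? sums (fun y => y) = some m)
    (hidx : PySem.List.index? sums m = some k) :
    pvFirstMax sums k m := by
  have hmem := PySem.List.max?_mem hmx
  rcases (PySem.List.index?_eq_some_iff sums m k).mp hidx with ⟨pre, suf, hsplit, hplen, hnot⟩
  have hkn : k < sums.length := by rw [hsplit]; simp; omega
  have hgk : sums.getD k 0 = m := by
    rw [hsplit, List.getD_eq_getElem?_getD, List.getElem?_append_right (by omega), hplen]
    simp
  have hmax := PySem.List.max?_isMax hmx
  have h2 : ∀ j : Nat, j < sums.length → sums.getD j 0 ≤ m := by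
    intro j hj
    exact hmax _ (by rw [List.getD_eq_getElem _ _ hj]; exact List.getElem_mem _)
  refine ⟨hkn, hgk, ?_, h2⟩
  intro j hj
  have hj' : j < sums.length := by omega
  have hje : sums.getD j 0 = pre.getD j 0 := by
    rw [hsplit, List.getD_eq_getElem?_getD, List.getElem?_append_left (by omega),
      ← List.getD_eq_getElem?_getD]
  have hmem' : sums.getD j 0 ∈ pre := by
    rw [hje]; rw [List.getD_eq_getElem _ _ (by omega)]; exact List.getElem_mem _
  have hne : sums.getD j 0 ≠ m := fun h => hnot (h ▸ hmem')
  exact lt_of_le_of_ne (h2 j hj') hne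

-- ---- final assembly ----

theorem pv_final (strlist : List String) (hpre : strlist ≠ []) :
    highestSum strlist = highestSum_alt strlist := by
  have hn : 0 < strlist.length := List.length_pos_iff.mpr hpre
  simp only [highestSum, highestSum_alt]
  rw [pv_summation_eq strlist]
  set sums := strlist.map pvDigitSumA with hsums
  rcases hmx : PySem.List.max? sums (fun y => y) with _ | m
  · exact absurd ((PySem.List.max?_eq_none_iff _ _).mp hmx) (by simp [hsums, hpre])
  have hmem := PySem.List.max?_mem hmx
  rcases hidx : PySem.List.index? sums m with _ | k
  · exact absurd ((PySem.List.index?_eq_none_iff _ _).mp hidx) (by simp [hmem])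
  have hA := pv_A_firstmax sums m k hmx hidx
  obtain ⟨k', m', hB, hfold⟩ := pv_foldB strlist hpre
  rw [hfold]
  have hk := pvFirstMax_unique sums k k' m m' hA (hsums ▸ hB)
  have hidx' : List.idxOf? m sums = some k := hidx
  simp [hidx', hk]

-- ===== VERDICT (by name: the statement is the Claim_ definition above) =====
theorem highestSum_spec : Claim_equal_highestSum := by
  intro strlist _ hpre
  unfold Spec_highestSum
  exact pv_final strlist hpre
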